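-- pv_equiv track=rewrite | github.com/denson/hypergraph_code_explorer | src/hypergraph_code_explorer/visualization.py | _is_seed_related
-- ===== SOURCE A (Python) =====
-- def _is_seed_related(node_id: str, seed_nodes: set[str]) -> bool:
--     """Check if a node matches any seed via exact, prefix, or suffix match."""
--     if node_id in seed_nodes:
--         return True
--     for seed in seed_nodes:
--         if node_id.startswith(seed + ".") or node_id.endswith("." + seed):
--             return True
--         if "." in seed and node_id == seed.split(".")[-1]:
--             return True
--     return False
-- ===== SOURCE B (Python) =====
-- def _is_seed_related(node_id: str, seed_nodes) -> bool:
--     """Seed match via an index on node_id's own dot boundaries instead of a per-seed scan."""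
--     seeds = set(seed_nodes)
--     if node_id in seeds:
--         return True
--     last_parts = {s.split(".")[-1] for s in seeds if "." in s}
--     if node_id in last_parts:
--         return True
--     for i, ch in enumerate(node_id):
--         if ch == "." and (node_id[:i] in seeds or node_id[i + 1:] in seeds):
--             return True
--     return False
-- ===== Notes on version B (the rewrite author's own statement) =====
-- stated objective: alternative
-- what changed: Instead of scanning every seed and testing startswith(seed+'.')/endswith('.'+seed), B puts the seeds in a set, precomputes the set of last dot-components, and enumerates node_id's dot positions, looking each prefix/suffix slice up in the seed set.
import Mathlib
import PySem

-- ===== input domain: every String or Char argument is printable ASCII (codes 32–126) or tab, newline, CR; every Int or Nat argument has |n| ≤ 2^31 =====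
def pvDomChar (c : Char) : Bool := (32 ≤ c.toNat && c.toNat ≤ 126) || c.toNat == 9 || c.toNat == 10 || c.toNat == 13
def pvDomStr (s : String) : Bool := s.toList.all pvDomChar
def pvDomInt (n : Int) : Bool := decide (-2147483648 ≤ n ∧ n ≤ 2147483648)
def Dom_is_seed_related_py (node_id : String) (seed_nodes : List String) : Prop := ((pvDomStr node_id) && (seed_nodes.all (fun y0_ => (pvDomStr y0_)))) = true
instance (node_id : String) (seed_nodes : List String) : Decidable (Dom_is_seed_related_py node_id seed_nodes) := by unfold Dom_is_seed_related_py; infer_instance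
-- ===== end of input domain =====

-- B replaces A's per-seed startswith/endswith scan by enumerating node_id's own dot
-- boundaries and looking the two slices up in a set of the seeds (objective: alternative
-- algorithm, similar cost; equal return value on every input).

-- ===== PORT A =====
-- s.split(".")[-1]  (both Pythons contain this exact subexpression)
def pvLastDotPart (s : String) : String :=
  String.ofList ((PySem.Chars.splitOn s.toList ['.']).getLast!)

def is_seed_related_py (node_id : String) (seed_nodes : List String) : Bool :=
  -- 'if node_id in seed_nodes: return True' then the early-return for-loop, then 'return False'
  seed_nodes.contains node_id ||
    seed_nodes.any (fun seed =>
      (PySem.Str.startswith node_id (seed ++ ".") || PySem.Str.endswith node_id ("." ++ seed)) ||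
      (PySem.Str.isIn "." seed && (node_id == pvLastDotPart seed)))

-- ===== PORT B =====
def is_seed_related_py_alt (node_id : String) (seed_nodes : List String) : Bool :=
  let seeds : PySem.Set String := PySem.Set.ofList seed_nodes
  let lastParts : PySem.Set String :=
    PySem.Set.ofList ((seeds.filter (fun s => PySem.Str.isIn "." s)).map pvLastDotPart)
  let cs := node_id.toList
  seeds.contains node_id ||
    lastParts.contains node_id ||
    (List.range cs.length).any (fun i =>
      cs[i]? == some '.' &&
        (seeds.contains (String.ofList (cs.take i)) ||
         seeds.contains (String.ofList (cs.drop (i + 1)))))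

-- ===== PRECONDITION & SPEC =====
def Spec_is_seed_related_py (node_id : String) (seed_nodes : List String) (out : Bool) : Prop := out = is_seed_related_py_alt node_id seed_nodes
instance (node_id : String) (seed_nodes : List String) (out : Bool) : Decidable (Spec_is_seed_related_py node_id seed_nodes out) := by unfold Spec_is_seed_related_py; infer_instance

-- ===== CLAIM (what is proved, stated in full; the proofs are below) =====
def Claim_equal_is_seed_related_py : Prop := ∀ (node_id : String) (seed_nodes : List String), Dom_is_seed_related_py node_id seed_nodes → Spec_is_seed_related_py node_id seed_nodes (is_seed_related_py node_id seed_nodes)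

-- ===== LEMMAS AND PROOFS =====

-- node_id starts with seed+"." iff some dot position i of node_id has node_id[:i] = seed
theorem prefix_dot_iff (p cs : List Char) :
    (p ++ ['.']) <+: cs ↔ ∃ i, cs[i]? = some '.' ∧ cs.take i = p := by
  constructor
  · rintro ⟨r, hr⟩
    refine ⟨p.length, ?_, ?_⟩ <;> subst hr <;> simp
  · rintro ⟨i, hv, ht⟩
    rw [List.getElem?_eq_some_iff] at hv
    obtain ⟨hi, hv⟩ := hv
    exact ⟨cs.drop (i + 1), by rw [← ht, List.append_assoc, List.singleton_append, ← hv,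
      List.getElem_cons_drop, List.take_append_drop]⟩

-- node_id ends with "."+seed iff some dot position i of node_id has node_id[i+1:] = seed
theorem suffix_dot_iff (s cs : List Char) :
    ('.' :: s) <:+ cs ↔ ∃ i, cs[i]? = some '.' ∧ cs.drop (i + 1) = s := by
  constructor
  · rintro ⟨f, hf⟩
    refine ⟨f.length, ?_, ?_⟩ <;> subst hf <;> simp
  · rintro ⟨i, hv, hd⟩
    rw [List.getElem?_eq_some_iff] at hv
    obtain ⟨hi, hv⟩ := hv
    exact ⟨cs.take i, by rw [← hd, ← hv, List.getElem_cons_drop, List.take_append_drop]⟩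

theorem ports_eq (node_id : String) (seed_nodes : List String) :
    is_seed_related_py node_id seed_nodes = is_seed_related_py_alt node_id seed_nodes := by
  apply Bool.coe_iff_coe.mp
  simp only [is_seed_related_py, is_seed_related_py_alt]
  simp [List.any_eq_true, PySem.Set.mem_ofList, List.mem_filter,
    PySem.Chars.startswith_iff, PySem.Chars.endswith_iff]
  constructor
  · rintro (hm | ⟨s, hs, (hp | hsuf) | ⟨hdot, heq⟩⟩)
    · exact Or.inl (Or.inl hm)
    · obtain ⟨i, hv, ht⟩ := (prefix_dot_iff _ _).mp hp
      refine Or.inr ⟨i, ?_, hv, Or.inl ?_⟩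
      · have := (List.getElem?_eq_some_iff.mp hv).1
        simpa using this
      · rw [ht]; simpa using hs
    · obtain ⟨i, hv, hd⟩ := (suffix_dot_iff _ _).mp hsuf
      refine Or.inr ⟨i, ?_, hv, Or.inr ?_⟩
      · have := (List.getElem?_eq_some_iff.mp hv).1
        simpa using this
      · rw [hd]; simpa using hs
    · exact Or.inl (Or.inr ⟨s, ⟨hs, hdot⟩, heq.symm⟩)
  · rintro ((hm | ⟨a, ⟨ha, hdot⟩, heq⟩) | ⟨i, _, hv, (ht | hd)⟩)
    · exact Or.inl hm
    · exact Or.inr ⟨a, ha, Or.inr ⟨hdot, heq.symm⟩⟩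
    · exact Or.inr ⟨_, ht, Or.inl (Or.inl ((prefix_dot_iff _ _).mpr ⟨i, hv, by simp⟩))⟩
    · exact Or.inr ⟨_, hd, Or.inl (Or.inr ((suffix_dot_iff _ _).mpr ⟨i, hv, by simp⟩))⟩

-- ===== VERDICT (by name: the statement is the Claim_ definition above) =====
theorem is_seed_related_py_spec : Claim_equal_is_seed_related_py := by
  intro n ss _
  unfold Spec_is_seed_related_py
  exact ports_eq n ss
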